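-- pv_equiv track=rewrite | github.com/Allenrovas/v0-programa-de-deteccion-de-copias | backend/services/similarity/enhanced_processor.py | create_token_mapping
-- ===== SOURCE A (Python) =====
-- from typing import List, Dict, Any, Optional, Tuple
--
-- def create_token_mapping(content: str, tokens: List) -> Tuple[List[int], List[int]]:
--     """
--     Crea mapeo preciso de tokens a líneas y caracteres
--     """
--     lines = content.split('\n')
--     line_map = []
--     char_map = []
--
--     current_pos = 0
--     current_line = 0
--
--     for token in tokens:
--         token_str = str(token)
--
--         # Buscar el token en el contenido desde la posición actual
--         while current_pos < len(content):
--             if content[current_pos:current_pos + len(token_str)] == token_str: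
--                 # Encontrado el token
--                 char_map.append(current_pos)
--
--                 # Calcular la línea
--                 while current_line < len(lines) and \
--                       sum(len(line) + 1 for line in lines[:current_line + 1]) <= current_pos:
--                     current_line += 1
--
--                 line_map.append(current_line)
--                 current_pos += len(token_str)
--                 break
--
--             current_pos += 1
--             if content[current_pos - 1] == '\n':
--                 current_line += 1
--
--     return line_map, char_map
-- ===== SOURCE B (Python) =====
-- import bisect
--
-- def create_token_mapping(content, tokens):
--     """
--     Crea mapeo preciso de tokens a líneas y caracteres
--     """
--     # positions of all newlines, once; line of a char = bisect into this list
--     newlines = [i for i, c in enumerate(content) if c == '\n']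
--     line_map = []
--     char_map = []
--     pos = 0
--     n = len(content)
--     for token in tokens:
--         token_str = str(token)
--         if pos >= n:
--             break
--         found = content.find(token_str, pos)
--         if found == -1:
--             pos = n
--             continue
--         char_map.append(found)
--         line_map.append(bisect.bisect_left(newlines, found))
--         pos = found + len(token_str)
--     return line_map, char_map
-- ===== Notes on version B (the rewrite author's own statement) =====
-- stated objective: faster
-- what changed: Replaces the char-by-char scan with re-summed line-length prefix sums per position by str.find from the current offset plus a precomputed sorted list of newline positions queried with bisect for the line number.
import Mathlib
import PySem

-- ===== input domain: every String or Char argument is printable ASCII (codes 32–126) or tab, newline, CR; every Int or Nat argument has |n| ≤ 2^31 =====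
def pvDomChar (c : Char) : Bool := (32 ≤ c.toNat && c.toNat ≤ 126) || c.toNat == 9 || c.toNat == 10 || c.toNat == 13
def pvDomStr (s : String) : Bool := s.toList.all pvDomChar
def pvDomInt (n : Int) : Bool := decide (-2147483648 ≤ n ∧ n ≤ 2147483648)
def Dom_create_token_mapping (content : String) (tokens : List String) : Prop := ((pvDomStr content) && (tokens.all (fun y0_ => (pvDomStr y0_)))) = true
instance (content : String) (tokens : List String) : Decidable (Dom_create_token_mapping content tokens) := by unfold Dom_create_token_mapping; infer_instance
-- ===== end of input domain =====

-- B precomputes the sorted newline positions once and finds each token with str.find + bisect,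
-- instead of A's char-by-char scan that re-sums line-length prefix sums; return values identical.

-- ===== PORT A =====

-- inner `while current_line < len(lines) and sum(len(line)+1 for line in lines[:current_line+1]) <= current_pos`
def ctmAdvance (lines : List (List Char)) (pos : Nat) (cl : Nat) : Nat :=
  if cl < lines.length ∧ (((lines.take (cl+1)).map (fun l => l.length + 1)).sum ≤ pos) then
    ctmAdvance lines pos (cl+1)
  else cl
termination_by lines.length - cl

-- inner `while current_pos < len(content): …` search loop; returns (current_pos, current_line, found (char,line))
def ctmScan (cs : List Char) (lines : List (List Char)) (tok : List Char) (pos cl : Nat) :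
    Nat × Nat × Option (Nat × Nat) :=
  if pos < cs.length then
    if (cs.drop pos).take tok.length = tok then
      let nl := ctmAdvance lines pos cl
      (pos + tok.length, nl, some (pos, nl))
    else
      let pos' := pos + 1
      -- `if content[current_pos - 1] == '\n'` (pos' - 1 is always in range here)
      let cl' := if PySem.List.pyGetD cs ((pos' : Int) - 1) ' ' = '\n' then cl + 1 else cl
      ctmScan cs lines tok pos' cl'
  else (pos, cl, none)
termination_by cs.length - pos

-- one iteration of `for token in tokens`, state (line_map, char_map, current_pos, current_line)
def ctmStep (cs : List Char) (lines : List (List Char))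
    (st : List Int × List Int × Nat × Nat) (tok : List Char) : List Int × List Int × Nat × Nat :=
  match ctmScan cs lines tok st.2.2.1 st.2.2.2 with
  | (pos', cl', none) => (st.1, st.2.1, pos', cl')
  | (pos', cl', some pr) => (st.1 ++ [(pr.2 : Int)], st.2.1 ++ [(pr.1 : Int)], pos', cl')

def create_token_mapping (content : String) (tokens : List String) : List Int × List Int :=
  let cs := content.toList
  let lines := PySem.Chars.splitOn cs ['\n']   -- content.split('\n')
  let st := tokens.foldl (fun st tok => ctmStep cs lines st tok.toList) ([], [], 0, 0)
  (st.1, st.2.1)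

-- ===== PORT B =====

-- the `for token in tokens` loop of Source B (break / continue become the recursion shape)
def ctmAltGo (cs : List Char) (nl : List Int) : List String → Nat → List Int × List Int
  | [], _ => ([], [])
  | t :: ts, pos =>
    if cs.length ≤ pos then ([], [])            -- if pos >= n: break
    else
      let found := PySem.Chars.findFrom cs t.toList (pos : Int)   -- content.find(token_str, pos)
      if found = -1 then ctmAltGo cs nl ts cs.length              -- pos = n; continue
      else
        let r := ctmAltGo cs nl ts (found.toNat + t.toList.length)
        ((PySem.List.bisectLeft nl found : Int) :: r.1, found :: r.2)

def create_token_mapping_alt (content : String) (tokens : List String) : List Int × List Int :=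
  let cs := content.toList
  -- newlines = [i for i, c in enumerate(content) if c == '\n']
  let nl := ((PySem.List.enumerate cs).filter (fun p => p.2 == '\n')).map (·.1)
  ctmAltGo cs nl tokens 0

-- ===== PRECONDITION & SPEC =====
def Spec_create_token_mapping (content : String) (tokens : List String) (out : List Int × List Int) : Prop := out = create_token_mapping_alt content tokens
instance (content : String) (tokens : List String) (out : List Int × List Int) : Decidable (Spec_create_token_mapping content tokens out) := by unfold Spec_create_token_mapping; infer_instance

-- ===== CLAIM (what is proved, stated in full; the proofs are below) =====
def Claim_equal_create_token_mapping : Prop := ∀ (content : String) (tokens : List String), Dom_create_token_mapping content tokens → Spec_create_token_mapping content tokens (create_token_mapping content tokens)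

-- ===== LEMMAS AND PROOFS =====

def splitNL : List Char → List (List Char)
  | [] => [[]]
  | c :: r => if c = '\n' then [] :: splitNL r else (splitNL r).modifyHead (c :: ·)

theorem splitNL_ne_nil (s : List Char) : splitNL s ≠ [] := by
  cases s with
  | nil => simp [splitNL]
  | cons c r =>
    simp only [splitNL]
    split
    · simp
    · cases h : splitNL r with
      | nil => exact absurd h (splitNL_ne_nil r)
      | cons a t => simp [List.modifyHead]

theorem go_eq (s : List Char) : ∀ (fuel : Nat) (cur : List Char) (acc : List (List Char)),
    s.length ≤ fuel →
    PySem.Chars.splitOn.go ['\n'] fuel s cur acc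
      = acc.reverse ++ (splitNL s).modifyHead (cur.reverse ++ ·) := by
  induction s with
  | nil =>
    intro fuel cur acc _
    cases fuel <;> simp [PySem.Chars.splitOn.go, splitNL]
  | cons c r ih =>
    intro fuel cur acc hle
    cases fuel with
    | zero => simp at hle
    | succ f =>
      have hf : r.length ≤ f := by simpa using hle
      by_cases hc : c = '\n'
      · have hpre : ['\n'].isPrefixOf (c :: r) = true := by simp [hc, List.isPrefixOf]
        simp only [PySem.Chars.splitOn.go, hc, List.length_singleton,
          List.drop_succ_cons, List.drop_zero]
        rw [ih f [] (cur.reverse :: acc) hf]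
        simp [splitNL, List.modifyHead]
        cases splitNL r <;> rfl
      · have hpre : ['\n'].isPrefixOf (c :: r) = false := by
          simp [List.isPrefixOf]; exact fun h => hc h.symm
        simp only [PySem.Chars.splitOn.go, hpre, Bool.false_eq_true, if_false]
        rw [ih f (c :: cur) acc hf]
        simp only [splitNL, if_neg hc]
        cases h : splitNL r with
        | nil => exact absurd h (splitNL_ne_nil r)
        | cons a t => simp [List.modifyHead]

theorem splitOn_eq (cs : List Char) : PySem.Chars.splitOn cs ['\n'] = splitNL cs := by
  unfold PySem.Chars.splitOn
  rw [go_eq cs (cs.length + 1) [] [] (by omega)]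
  cases h : splitNL cs with
  | nil => exact absurd h (splitNL_ne_nil cs)
  | cons a t => simp [List.modifyHead]

def Lcnt (cs : List Char) (p : Nat) : Nat := (cs.take p).count '\n'

theorem Lcnt_zero (cs : List Char) : Lcnt cs 0 = 0 := by simp [Lcnt]

theorem Lcnt_mono (cs : List Char) {p q : Nat} (h : p ≤ q) : Lcnt cs p ≤ Lcnt cs q := by
  unfold Lcnt
  rw [← List.take_append_drop p (cs.take q), List.take_take, min_eq_left h, List.count_append]
  omega

theorem Lcnt_succ (cs : List Char) (p : Nat) (h : p < cs.length) :
    Lcnt cs (p+1) = Lcnt cs p + (if cs[p] = '\n' then 1 else 0) := by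
  unfold Lcnt
  rw [List.take_add_one, List.count_append]
  simp [List.getElem?_eq_getElem h, List.count_singleton]

theorem Lcnt_len (cs : List Char) : Lcnt cs cs.length = cs.count '\n' := by simp [Lcnt]

theorem length_splitNL (cs : List Char) : (splitNL cs).length = cs.count '\n' + 1 := by
  induction cs with
  | nil => simp [splitNL]
  | cons c r ih =>
    by_cases hc : c = '\n'
    · simp [splitNL, hc, ih]
    · cases h : splitNL r with
      | nil => exact absurd h (splitNL_ne_nil r)
      | cons a t =>
        simp [splitNL, hc, h, List.modifyHead]
        have := ih; rw [h] at this; simp at this; omega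

theorem sum_take_splitNL (cs : List Char) : ∀ (k p : Nat), p ≤ cs.length →
    ((((splitNL cs).take k).map (fun l => l.length + 1)).sum ≤ p ↔ k ≤ Lcnt cs p) := by
  induction cs with
  | nil =>
    intro k p hp
    have : p = 0 := by simpa using hp
    subst this
    cases k <;> simp [splitNL, Lcnt]
  | cons c r ih =>
    intro k p hp
    by_cases hc : c = '\n'
    · cases k with
      | zero => simp [Lcnt]
      | succ k' =>
        cases p with
        | zero => simp [splitNL, hc, Lcnt]
        | succ p' =>
          have hp' : p' ≤ r.length := by simpa using hp
          have := ih k' p' hp'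
          simp only [splitNL, if_pos hc, List.take_succ_cons, List.map_cons, List.sum_cons]
          unfold Lcnt at *
          simp only [List.take_succ_cons, List.count_cons, hc]
          simp only [beq_iff_eq] at *
          simp only [List.length_nil, if_true]
          omega
    · cases h : splitNL r with
      | nil => exact absurd h (splitNL_ne_nil r)
      | cons a t =>
        cases k with
        | zero => simp [Lcnt]
        | succ k' =>
          cases p with
          | zero =>
            simp only [splitNL, if_neg hc, h, List.modifyHead, Lcnt_zero]
            simp
          | succ p' =>
            have hp' : p' ≤ r.length := by simpa using hp
            have := ih (k'+1) p' hp'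
            rw [h] at this
            simp only [splitNL, if_neg hc, h, List.modifyHead, List.take_succ_cons,
              List.map_cons, List.sum_cons] at *
            unfold Lcnt at *
            simp only [List.take_succ_cons, List.count_cons] at *
            have hcc : ('\n' == c) = false := by simp; exact fun hh => hc hh.symm
            rw [hcc] at *
            have hcb : (c == '\n') = false := by simpa using hc
            simp only [hcb, Bool.false_eq_true, if_false, List.length_cons] at *
            omega

theorem ctmAdvance_eq (cs : List Char) (pos : Nat) (hpos : pos ≤ cs.length)
    (cl : Nat) (hcl : cl ≤ Lcnt cs pos) : ctmAdvance (splitNL cs) pos cl = Lcnt cs pos := by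
  by_cases hlt : cl < Lcnt cs pos
  · rw [ctmAdvance]
    have hcond : cl < (splitNL cs).length ∧
        ((((splitNL cs).take (cl+1)).map (fun l => l.length + 1)).sum ≤ pos) := by
      constructor
      · rw [length_splitNL]
        have := Lcnt_mono cs hpos
        rw [Lcnt_len] at this
        omega
      · exact (sum_take_splitNL cs (cl+1) pos hpos).mpr (by omega)
    rw [if_pos hcond]
    exact ctmAdvance_eq cs pos hpos (cl+1) (by omega)
  · have heq : cl = Lcnt cs pos := by omega
    rw [ctmAdvance]
    rw [if_neg]
    · exact heq
    rintro ⟨-, hsum⟩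
    have := (sum_take_splitNL cs (cl+1) pos hpos).mp hsum
    omega
termination_by Lcnt cs pos - cl
decreasing_by omega

def nlIdx : List Char → Int → List Int
  | [], _ => []
  | c :: r, s => if c = '\n' then s :: nlIdx r (s+1) else nlIdx r (s+1)

theorem nl_eq_nlIdx (cs : List Char) : ∀ (s : Int),
    ((PySem.List.enumerate cs s).filter (fun p => p.2 == '\n')).map (·.1) = nlIdx cs s := by
  induction cs with
  | nil => intro s; simp [PySem.List.enumerate_nil, nlIdx]
  | cons c r ih =>
    intro s
    rw [PySem.List.enumerate_cons]
    by_cases hc : c = '\n' <;> simp [nlIdx, hc, ih]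

theorem nlIdx_mem (cs : List Char) : ∀ (s x : Int), x ∈ nlIdx cs s → s ≤ x ∧ x < s + cs.length := by
  induction cs with
  | nil => intro s x h; simp [nlIdx] at h
  | cons c r ih =>
    intro s x h
    simp only [nlIdx] at h
    split at h
    · rcases List.mem_cons.mp h with h1 | h2
      · subst h1; simp
      · have := ih (s+1) x h2; simp at *; omega
    · have := ih (s+1) x h; simp at *; omega

theorem nlIdx_pairwise (cs : List Char) : ∀ (s : Int), (nlIdx cs s).Pairwise (fun a b => a ≤ b) := by
  induction cs with
  | nil => intro s; simp [nlIdx]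
  | cons c r ih =>
    intro s
    simp only [nlIdx]
    split
    · refine List.pairwise_cons.mpr ⟨?_, ih (s+1)⟩
      intro x hx
      have := nlIdx_mem r (s+1) x hx
      omega
    · exact ih (s+1)

theorem nlIdx_countP (cs : List Char) : ∀ (s : Int) (i : Nat), i ≤ cs.length →
    (nlIdx cs s).countP (fun x => decide (x < s + i)) = Lcnt cs i := by
  induction cs with
  | nil =>
    intro s i h
    have : i = 0 := by simpa using h
    subst this; simp [nlIdx, Lcnt]
  | cons c r ih =>
    intro s i h
    cases i with
    | zero =>
      rw [Lcnt_zero]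
      rw [List.countP_eq_zero]
      intro x hx
      have := nlIdx_mem (c :: r) s x hx
      simp only [decide_eq_true_eq]
      omega
    | succ i' =>
      have hi' : i' ≤ r.length := by simpa using h
      have hL : Lcnt (c :: r) (i'+1) = (if c = '\n' then 1 else 0) + Lcnt r i' := by
        unfold Lcnt
        simp only [List.take_succ_cons, List.count_cons]
        by_cases hc : c = '\n'
        · simp [hc]; omega
        · simp [hc]
      have harith : s + 1 + (i' : Int) = s + ((i' : Nat) + 1 : Nat) := by push_cast; ring
      simp only [nlIdx]
      split
      · rename_i hc
        rw [List.countP_cons, hL, if_pos hc]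
        have h1 : (decide (s < s + ((i' : Nat) + 1 : Nat))) = true := by
          simp only [decide_eq_true_eq]; omega
        rw [h1]
        have := ih (s+1) i' hi'
        rw [harith] at this
        rw [this, if_pos rfl]
        omega
      · rename_i hc
        rw [hL, if_neg hc]
        have := ih (s+1) i' hi'
        rw [harith] at this
        rw [this]
        omega

theorem countP_of_cut (xs : List Int) (p : Int → Bool) (b : Nat) (hb : b ≤ xs.length)
    (h1 : ∀ (j : Nat) (hj : j < xs.length), j < b → p xs[j])
    (h2 : ∀ (j : Nat) (hj : j < xs.length), b ≤ j → ¬ p xs[j]) :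
    xs.countP p = b := by
  rw [← List.take_append_drop b xs, List.countP_append]
  have ht : (xs.take b).countP p = b := by
    rw [List.countP_eq_length.mpr, List.length_take, min_eq_left hb]
    intro x hx
    rcases List.mem_iff_getElem.mp hx with ⟨j, hj, rfl⟩
    rw [List.getElem_take]
    exact h1 j (by simp at hj; omega) (by simp at hj; omega)
  have hd : (xs.drop b).countP p = 0 := by
    rw [List.countP_eq_zero]
    intro x hx
    rcases List.mem_iff_getElem.mp hx with ⟨j, hj, rfl⟩
    rw [List.getElem_drop]
    exact h2 (b + j) (by simp at hj; omega) (by omega)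
  omega

theorem bisect_eq_Lcnt (cs : List Char) (i : Nat) (hi : i ≤ cs.length) :
    PySem.List.bisectLeft (nlIdx cs 0) (i : Int) = Lcnt cs i := by
  obtain ⟨hble, hlt, hge⟩ := PySem.List.bisectLeft_spec (nlIdx cs 0) (i : Int) (nlIdx_pairwise cs 0)
  have := countP_of_cut (nlIdx cs 0) (fun x => decide (x < (i : Int)))
    (PySem.List.bisectLeft (nlIdx cs 0) (i : Int)) hble
    (fun j hj hjb => by simpa using hlt j hj hjb)
    (fun j hj hjb => by simpa using not_lt.mpr (hge j hj hjb))
  have h2 := nlIdx_countP cs 0 i hi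
  simp only [zero_add] at h2
  omega

theorem findFrom_at_prefix (cs tok : List Char) (pos : Nat) (hpos : pos ≤ cs.length)
    (hpre : tok <+: cs.drop pos) : PySem.Chars.findFrom cs tok (pos : Int) = pos := by
  rw [PySem.Chars.findFrom_natCast cs tok pos hpos]
  have hinf : tok <:+: cs.drop pos := hpre.isInfix
  have hnn : 0 ≤ PySem.Chars.find (cs.drop pos) tok := (PySem.Chars.find_nonneg_iff _ _).mpr hinf
  obtain ⟨hp0, hmin⟩ := PySem.Chars.find_spec hnn
  have : (PySem.Chars.find (cs.drop pos) tok).toNat = 0 := by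
    by_contra hne
    exact hmin 0 (by omega) (by simpa using hpre)
  have hfind : PySem.Chars.find (cs.drop pos) tok = 0 := by omega
  rw [hfind]
  simp

theorem infix_drop_succ_of_infix (cs tok : List Char) (pos : Nat)
    (hnp : ¬ tok <+: cs.drop pos) (hinf : tok <:+: cs.drop pos) :
    tok <:+: cs.drop (pos + 1) := by
  have := (PySem.Chars.exists_prefix_drop_iff_isIn tok (cs.drop pos)).mpr
    ((PySem.Chars.isIn_iff_infix _ _).mpr hinf)
  obtain ⟨j, hj⟩ := this
  cases j with
  | zero => simp at hj; exact absurd hj hnp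
  | succ j' =>
    rw [List.drop_drop] at hj
    have hpre' : tok <+: (cs.drop (pos+1)).drop j' := by
      rw [List.drop_drop]
      have heq : pos + 1 + j' = pos + (j' + 1) := by omega
      rwa [heq]
    exact hpre'.isInfix.trans (List.drop_suffix _ _).isInfix

theorem infix_drop_of_infix_succ (cs tok : List Char) (pos : Nat)
    (hinf : tok <:+: cs.drop (pos + 1)) : tok <:+: cs.drop pos := by
  have hsfx : cs.drop (pos+1) <:+ cs.drop pos := by
    have h1 : cs.drop (pos+1) = (cs.drop pos).drop 1 := by rw [List.drop_drop]
    rw [h1]; exact List.drop_suffix _ _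
  exact hinf.trans hsfx.isInfix

theorem findFrom_step (cs tok : List Char) (pos : Nat) (hpos : pos < cs.length)
    (hnp : ¬ tok <+: cs.drop pos) :
    PySem.Chars.findFrom cs tok (((pos+1 : Nat)) : Int) = PySem.Chars.findFrom cs tok (pos : Int) := by
  by_cases hinf : tok <:+: cs.drop pos
  · have hinf' : tok <:+: cs.drop (pos+1) := infix_drop_succ_of_infix cs tok pos hnp hinf
    have hne : PySem.Chars.findFrom cs tok (pos : Int) ≠ -1 := by
      rw [Ne, PySem.Chars.findFrom_natCast_eq_neg_one_iff cs tok pos (by omega)]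
      simpa using hinf
    have hne' : PySem.Chars.findFrom cs tok ((pos+1 : Nat) : Int) ≠ -1 := by
      rw [Ne, PySem.Chars.findFrom_natCast_eq_neg_one_iff cs tok (pos+1) (by omega)]
      simpa using hinf'
    obtain ⟨hge, hp, hmin⟩ := PySem.Chars.findFrom_natCast_spec cs tok pos (by omega) hne
    obtain ⟨hge', hp', hmin'⟩ := PySem.Chars.findFrom_natCast_spec cs tok (pos+1) (by omega) hne'
    set f := PySem.Chars.findFrom cs tok (pos : Int) with hf
    set f' := PySem.Chars.findFrom cs tok ((pos+1 : Nat) : Int) with hf'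
    have hfpos : f.toNat ≠ pos := fun h => hnp (h ▸ hp)
    have h1 : f'.toNat ≤ f.toNat := by
      by_contra hlt
      exact hmin' f.toNat (by omega) (by omega) hp
    have h2 : f.toNat ≤ f'.toNat := by
      by_contra hlt
      exact hmin f'.toNat (by omega) (by omega) hp'
    omega
  · have hinfn : ¬ tok <:+: cs.drop (pos+1) := fun h => hinf (infix_drop_of_infix_succ cs tok pos h)
    rw [(PySem.Chars.findFrom_natCast_eq_neg_one_iff cs tok (pos+1) (by omega)).mpr (by simpa using hinfn),
        (PySem.Chars.findFrom_natCast_eq_neg_one_iff cs tok pos (by omega)).mpr (by simpa using hinf)]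
theorem ctmScan_found (cs tok : List Char) (pos cl : Nat) (hpos : pos < cs.length)
    (hcl : cl ≤ Lcnt cs pos) (hinf : tok <:+: cs.drop pos) :
    ctmScan cs (splitNL cs) tok pos cl =
      ((PySem.Chars.findFrom cs tok (pos : Int)).toNat + tok.length,
       Lcnt cs (PySem.Chars.findFrom cs tok (pos : Int)).toNat,
       some ((PySem.Chars.findFrom cs tok (pos : Int)).toNat,
             Lcnt cs (PySem.Chars.findFrom cs tok (pos : Int)).toNat)) := by
  by_cases hpre : tok <+: cs.drop pos
  · have hf : PySem.Chars.findFrom cs tok (pos : Int) = pos :=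
      findFrom_at_prefix cs tok pos (by omega) hpre
    rw [ctmScan, if_pos hpos]
    have htake : (cs.drop pos).take tok.length = tok := (List.prefix_iff_eq_take.mp hpre).symm
    rw [if_pos htake]
    rw [hf]
    simp only [Int.toNat_natCast]
    rw [ctmAdvance_eq cs pos (by omega) cl hcl]
  · rw [ctmScan, if_pos hpos]
    have htake : ¬ (cs.drop pos).take tok.length = tok := by
      intro h; exact hpre (List.prefix_iff_eq_take.mpr h.symm)
    rw [if_neg htake]
    have hstep : PySem.Chars.findFrom cs tok (((pos+1 : Nat)) : Int)
        = PySem.Chars.findFrom cs tok (pos : Int) := findFrom_step cs tok pos hpos hpre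
    have hinf' : tok <:+: cs.drop (pos+1) := infix_drop_succ_of_infix cs tok pos hpre hinf
    -- the new current_line stays below Lcnt (pos+1)
    have hget : PySem.List.pyGetD cs ((((pos+1 : Nat)) : Int) - 1) ' ' = cs[pos] := by
      have h1 : (((pos+1 : Nat)) : Int) - 1 = ((pos : Nat) : Int) := by push_cast; ring
      rw [h1, PySem.List.pyGetD_natCast, List.getD_eq_getElem?_getD,
        List.getElem?_eq_getElem hpos]
      rfl
    by_cases hend : pos + 1 < cs.length
    · have hrec := ctmScan_found cs tok (pos+1)
        (if PySem.List.pyGetD cs ((((pos+1 : Nat)) : Int) - 1) ' ' = '\n' then cl + 1 else cl)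
        hend (by
          rw [hget, Lcnt_succ cs pos hpos]
          by_cases hnl : cs[pos] = '\n'
          · simp [hnl]; omega
          · simp [hnl]; omega) hinf'
      rw [hrec, hstep]
    · -- pos+1 = cs.length: drop (pos+1) = [], so tok = [], contradicting ¬ tok <+: …
      exfalso
      have hnil : cs.drop (pos+1) = [] := List.drop_eq_nil_of_le (by omega)
      rw [hnil] at hinf'
      have : tok = [] := List.eq_nil_of_infix_nil hinf'
      exact hpre (this ▸ List.nil_prefix)
termination_by cs.length - pos

theorem ctmScan_none (cs tok : List Char) (pos cl : Nat) (hpos : pos ≤ cs.length)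
    (hninf : ¬ tok <:+: cs.drop pos) :
    ∃ cl', ctmScan cs (splitNL cs) tok pos cl = (cs.length, cl', none) := by
  by_cases h : pos < cs.length
  · have hpre : ¬ tok <+: cs.drop pos := fun hp => hninf hp.isInfix
    have htake : ¬ (cs.drop pos).take tok.length = tok := by
      intro hh; exact hpre (List.prefix_iff_eq_take.mpr hh.symm)
    rw [ctmScan, if_pos h, if_neg htake]
    exact ctmScan_none cs tok (pos+1) _ (by omega)
      (fun hh => hninf (infix_drop_of_infix_succ cs tok pos hh))
  · have : pos = cs.length := by omega
    subst this
    rw [ctmScan, if_neg (by omega)]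
    exact ⟨cl, rfl⟩
termination_by cs.length - pos

theorem ctmAltGo_end (cs : List Char) (nl : List Int) (toks : List String) (pos : Nat)
    (h : cs.length ≤ pos) : ctmAltGo cs nl toks pos = ([], []) := by
  cases toks with
  | nil => rfl
  | cons t ts => rw [ctmAltGo, if_pos h]

theorem fold_end (cs : List Char) (lines : List (List Char)) (lm cm : List Int) (cl : Nat) :
    ∀ (toks : List String),
    toks.foldl (fun st tok => ctmStep cs lines st tok.toList) (lm, cm, cs.length, cl)
      = (lm, cm, cs.length, cl) := by
  intro toks
  induction toks with
  | nil => rfl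
  | cons t ts ih =>
    rw [List.foldl_cons]
    have hstep : ctmStep cs lines (lm, cm, cs.length, cl) t.toList = (lm, cm, cs.length, cl) := by
      unfold ctmStep
      dsimp only
      rw [ctmScan, if_neg (by omega)]
    rw [hstep, ih]

theorem fold_main (cs : List Char) (toks : List String) : ∀ (lm cm : List Int) (pos cl : Nat),
    pos ≤ cs.length → cl ≤ Lcnt cs pos →
    (toks.foldl (fun st tok => ctmStep cs (splitNL cs) st tok.toList) (lm, cm, pos, cl)).1
        = lm ++ (ctmAltGo cs (nlIdx cs 0) toks pos).1
      ∧ (toks.foldl (fun st tok => ctmStep cs (splitNL cs) st tok.toList) (lm, cm, pos, cl)).2.1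
        = cm ++ (ctmAltGo cs (nlIdx cs 0) toks pos).2 := by
  induction toks with
  | nil => intro lm cm pos cl _ _; simp [ctmAltGo]
  | cons t ts ih =>
    intro lm cm pos cl hpos hcl
    by_cases hend : cs.length ≤ pos
    · have hpe : pos = cs.length := by omega
      subst hpe
      rw [fold_end cs (splitNL cs) lm cm cl (t :: ts)]
      rw [ctmAltGo_end cs (nlIdx cs 0) (t :: ts) cs.length (by omega)]
      simp
    · have hlt : pos < cs.length := by omega
      rw [List.foldl_cons]
      by_cases hinf : t.toList <:+: cs.drop pos
      · -- found
        set f := PySem.Chars.findFrom cs t.toList (pos : Int) with hf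
        have hne : f ≠ -1 := by
          rw [hf, Ne, PySem.Chars.findFrom_natCast_eq_neg_one_iff cs t.toList pos (by omega)]
          simpa using hinf
        obtain ⟨hge, hp, hmin⟩ :=
          PySem.Chars.findFrom_natCast_spec cs t.toList pos (by omega) (hf ▸ hne)
        rw [← hf] at hge hp hmin
        have hf0 : 0 ≤ f := le_trans (by positivity) hge
        have hfle : f ≤ (cs.length : Int) := by
          rw [hf, PySem.Chars.findFrom_natCast cs t.toList pos (by omega)]
          have h2 := PySem.Chars.find_le_length (cs.drop pos) t.toList
          rw [List.length_drop] at h2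
          split
          · omega
          · omega
        have hflen : f.toNat + t.toList.length ≤ cs.length := by
          have h1 := hp.length_le
          rw [List.length_drop] at h1
          omega
        have hstep : ctmStep cs (splitNL cs) (lm, cm, pos, cl) t.toList
            = (lm ++ [(Lcnt cs f.toNat : Int)], cm ++ [(f.toNat : Int)],
               f.toNat + t.toList.length, Lcnt cs f.toNat) := by
          unfold ctmStep
          dsimp only
          rw [ctmScan_found cs t.toList pos cl hlt hcl hinf]
        rw [hstep]
        have hih := ih (lm ++ [(Lcnt cs f.toNat : Int)]) (cm ++ [(f.toNat : Int)])
          (f.toNat + t.toList.length) (Lcnt cs f.toNat) hflen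
          (Lcnt_mono cs (by omega))
        rw [hih.1, hih.2]
        rw [ctmAltGo, if_neg hend, ← hf, if_neg hne]
        have hbis : PySem.List.bisectLeft (nlIdx cs 0) f = Lcnt cs f.toNat := by
          have h1 : f = ((f.toNat : Nat) : Int) := by omega
          conv_lhs => rw [h1]
          exact bisect_eq_Lcnt cs f.toNat (by omega)
        rw [hbis]
        have h2 : ((f.toNat : Nat) : Int) = f := by omega
        constructor
        · simp
        · rw [h2]
          simp
      · -- not found: pos jumps to len, nothing appended, rest is empty on both sides
        obtain ⟨cl', hscan⟩ := ctmScan_none cs t.toList pos cl (by omega) hinf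
        have hstep : ctmStep cs (splitNL cs) (lm, cm, pos, cl) t.toList
            = (lm, cm, cs.length, cl') := by
          unfold ctmStep
          dsimp only
          rw [hscan]
        rw [hstep, fold_end cs (splitNL cs) lm cm cl' ts]
        have hne : PySem.Chars.findFrom cs t.toList (pos : Int) = -1 := by
          rw [PySem.Chars.findFrom_natCast_eq_neg_one_iff cs t.toList pos (by omega)]
          simpa using hinf
        rw [ctmAltGo, if_neg hend, hne, if_pos rfl]
        rw [ctmAltGo_end cs (nlIdx cs 0) ts cs.length (by omega)]
        simp

theorem create_token_mapping_main (content : String) (tokens : List String) :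
    create_token_mapping content tokens = create_token_mapping_alt content tokens := by
  unfold create_token_mapping create_token_mapping_alt
  dsimp only
  rw [splitOn_eq, nl_eq_nlIdx]
  have h := fold_main content.toList tokens [] [] 0 0 (by omega) (by rw [Lcnt_zero])
  rw [Prod.ext_iff]
  exact ⟨by simpa using h.1, by simpa using h.2⟩

-- ===== VERDICT (by name: the statement is the Claim_ definition above) =====
theorem create_token_mapping_spec : Claim_equal_create_token_mapping := by
  intro content tokens _
  unfold Spec_create_token_mapping
  exact create_token_mapping_main content tokens
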